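-- pv_equiv track=rewrite | github.com/gt-cec/maisr | utility/isr_gamedata_processor.py | search_type_calculator
-- ===== SOURCE A (Python) =====
-- def search_type_calculator(command_history, log_timestamp):
--     '''Helper function to calculate what search type the AI is in at a given timestamp.
--     Uses the gameplan command history logged at the end of the jsonl file
--     Outputs the agent's search mode at timestamp log_timestamp
--     '''
--
--     search_type = 'auto weapon'  # Initialize as auto weapon because that's how the AI starts
--     for cmd in command_history:
--         if cmd[0] <= log_timestamp:
--             if cmd[1] == 'autonomous': search_type = 'auto weapon'
--             elif cmd[1] == 'wez_id': search_type = 'manual weapon'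
--             elif cmd[1] == 'target_id': search_type = 'manual target'
--     return search_type
-- ===== SOURCE B (Python) =====
-- _MODE_MAP = {'autonomous': 'auto weapon', 'wez_id': 'manual weapon', 'target_id': 'manual target'}
--
-- def search_type_calculator(command_history, log_timestamp):
--     for ts, cmd in reversed(command_history):
--         if ts <= log_timestamp and cmd in _MODE_MAP:
--             return _MODE_MAP[cmd]
--     return 'auto weapon'
-- ===== Notes on version B (the rewrite author's own statement) =====
-- stated objective: idiomatic
-- what changed: B scans the history backwards with a mode-mapping dict and returns at the first qualifying recognized command, instead of A's forward fold that keeps overwriting state; unrecognized commands are skipped so the scan continues past them.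
import Mathlib
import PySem

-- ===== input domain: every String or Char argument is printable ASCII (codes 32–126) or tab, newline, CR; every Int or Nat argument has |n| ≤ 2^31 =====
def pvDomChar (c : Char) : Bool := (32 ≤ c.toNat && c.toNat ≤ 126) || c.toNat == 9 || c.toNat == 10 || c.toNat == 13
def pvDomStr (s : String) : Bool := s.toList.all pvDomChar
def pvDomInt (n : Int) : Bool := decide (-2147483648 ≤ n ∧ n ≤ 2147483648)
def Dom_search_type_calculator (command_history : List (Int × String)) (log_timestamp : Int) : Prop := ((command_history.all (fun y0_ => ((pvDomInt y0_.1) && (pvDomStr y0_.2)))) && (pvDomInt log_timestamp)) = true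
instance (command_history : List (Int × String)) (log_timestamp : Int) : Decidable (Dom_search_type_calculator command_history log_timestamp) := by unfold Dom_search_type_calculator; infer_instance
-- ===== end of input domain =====

-- B scans the history backwards with a mode-mapping dict and returns at the first
-- qualifying recognized command; unrecognized commands are skipped (idiomatic rewrite).


-- ===== PORT A =====
def search_type_calculator (command_history : List (Int × String)) (log_timestamp : Int) : String :=
  command_history.foldl (fun search_type cmd =>
    if cmd.1 ≤ log_timestamp then
      if cmd.2 = "autonomous" then "auto weapon"
      else if cmd.2 = "wez_id" then "manual weapon"
      else if cmd.2 = "target_id" then "manual target"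
      else search_type
    else search_type) "auto weapon"

-- ===== PORT B =====
def modeMap : PySem.Dict String String :=
  PySem.Dict.ofList [("autonomous", "auto weapon"), ("wez_id", "manual weapon"), ("target_id", "manual target")]

def altGo (log_timestamp : Int) : List (Int × String) → String
  | [] => "auto weapon"
  | c :: rest =>
    if c.1 ≤ log_timestamp then
      match modeMap.get? c.2 with
      | some v => v
      | none => altGo log_timestamp rest
    else altGo log_timestamp rest

def search_type_calculator_alt (command_history : List (Int × String)) (log_timestamp : Int) : String :=
  altGo log_timestamp command_history.reverse

-- ===== PRECONDITION & SPEC =====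
def Spec_search_type_calculator (command_history : List (Int × String)) (log_timestamp : Int) (out : String) : Prop := out = search_type_calculator_alt command_history log_timestamp
instance (command_history : List (Int × String)) (log_timestamp : Int) (out : String) : Decidable (Spec_search_type_calculator command_history log_timestamp out) := by unfold Spec_search_type_calculator; infer_instance

-- ===== CLAIM (what is proved, stated in full; the proofs are below) =====
def Claim_equal_search_type_calculator : Prop := ∀ (command_history : List (Int × String)) (log_timestamp : Int), Dom_search_type_calculator command_history log_timestamp → Spec_search_type_calculator command_history log_timestamp (search_type_calculator command_history log_timestamp)

-- ===== LEMMAS AND PROOFS =====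

-- The mapping dict looked up key by key.
theorem modeMap_get (s : String) : modeMap.get? s =
    (if s = "autonomous" then some "auto weapon"
     else if s = "wez_id" then some "manual weapon"
     else if s = "target_id" then some "manual target" else none) := by
  have hm : modeMap = PySem.Dict.mk [("autonomous", "auto weapon"), ("wez_id", "manual weapon"), ("target_id", "manual target")] := by decide
  rw [hm]
  simp only [PySem.Dict.get?_mk_cons, beq_iff_eq]
  rw [show PySem.Dict.mk ([] : List (String × String)) = PySem.Dict.empty from rfl,
    PySem.Dict.get?_empty]
  simp [eq_comm]

-- A's forward fold over r.reverse equals B's backward scan of r.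
theorem foldl_eq_altGo (t : Int) (r : List (Int × String)) :
    r.reverse.foldl (fun search_type cmd =>
      if cmd.1 ≤ t then
        if cmd.2 = "autonomous" then "auto weapon"
        else if cmd.2 = "wez_id" then "manual weapon"
        else if cmd.2 = "target_id" then "manual target"
        else search_type
      else search_type) "auto weapon" = altGo t r := by
  induction r with
  | nil => rfl
  | cons c rest ih =>
    simp only [List.reverse_cons, List.foldl_append, List.foldl_cons, List.foldl_nil, ih, altGo,
      modeMap_get]
    by_cases h1 : c.1 ≤ t
    · simp only [if_pos h1]
      by_cases h2 : c.2 = "autonomous"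
      · simp [h2]
      · by_cases h3 : c.2 = "wez_id"
        · simp [h2, h3]
        · by_cases h4 : c.2 = "target_id"
          · simp [h2, h3, h4]
          · simp [h2, h3, h4]
    · simp [if_neg h1]

-- ===== VERDICT (by name: the statement is the Claim_ definition above) =====
theorem search_type_calculator_spec : Claim_equal_search_type_calculator := by
  intro ch t _
  unfold Spec_search_type_calculator search_type_calculator search_type_calculator_alt
  have := foldl_eq_altGo t ch.reverse
  simpa using this
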